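-- pv_equiv track=rewrite | github.com/alexsavinov/okten-python | lesson02/additional/main2.py | list_of_lists
-- ===== SOURCE A (Python) =====
-- def list_of_lists(arg_list: list) -> list[list]:
--     res_list = []
--     i = 0
--     size = 0
--     while i < len(arg_list):
--         size += 1
--         n = 0
--         inner_list = []
--         while n < size and i != len(arg_list):
--             inner_list.append(arg_list[i])
--             i += 1
--             n += 1
--         res_list.append(inner_list)
--     return res_list
-- ===== SOURCE B (Python) =====
-- def list_of_lists(arg_list: list) -> list[list]:
--     def go(i, k):
--         # chunk k starts at offset i; slicing truncates the final partial chunk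
--         if i >= len(arg_list):
--             return []
--         return [arg_list[i:i + k]] + go(i + k, k + 1)
--     return go(0, 1)
-- ===== Notes on version B (the rewrite author's own statement) =====
-- stated objective: simpler
-- what changed: Replaces A's two nested index-tracking while loops with a short recursion that emits one slice arg_list[i:i+k] of growing size per call.
import Mathlib
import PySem

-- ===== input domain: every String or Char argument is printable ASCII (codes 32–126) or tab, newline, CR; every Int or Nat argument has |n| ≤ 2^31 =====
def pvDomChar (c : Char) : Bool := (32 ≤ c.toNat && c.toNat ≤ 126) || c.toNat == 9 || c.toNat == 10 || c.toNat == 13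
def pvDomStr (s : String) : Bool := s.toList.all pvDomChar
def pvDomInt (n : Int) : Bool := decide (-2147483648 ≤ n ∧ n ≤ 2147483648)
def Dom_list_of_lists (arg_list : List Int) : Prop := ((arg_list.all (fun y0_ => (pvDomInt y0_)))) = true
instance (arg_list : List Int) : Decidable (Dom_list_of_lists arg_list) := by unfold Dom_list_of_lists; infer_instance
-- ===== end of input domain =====

-- B replaces A's two nested index-tracking while loops by a short structural recursion
-- slicing off one chunk of growing size per call (objective: simpler).

-- ===== PORT A =====
-- inner while loop: `while n < size and i != len(arg_list): inner_list.append(arg_list[i]); i += 1; n += 1`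
-- returns (inner_list, i); the remaining iteration count `size - n` drives the structural recursion.
-- The loop guard keeps i < len throughout, so plain getD is exact here.
def pvInnerAGo (xs : List Int) : Nat → Nat → List Int → List Int × Nat
  | 0, i, acc => (acc, i)
  | k + 1, i, acc =>
    if i ≠ xs.length then pvInnerAGo xs k (i + 1) (acc ++ [xs.getD i 0])
    else (acc, i)

def pvInnerA (xs : List Int) (size n i : Nat) (acc : List Int) : List Int × Nat :=
  pvInnerAGo xs (size - n) i acc

-- outer while loop: `while i < len(arg_list): size += 1; …inner…; res_list.append(inner_list)`;
-- i strictly increases each iteration, so fuel = len(arg_list) iterations always suffice.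
def pvOuterAGo (xs : List Int) : Nat → Nat → Nat → List (List Int) → List (List Int)
  | 0, _, _, res => res
  | f + 1, i, size, res =>
    if i < xs.length then
      let p := pvInnerA xs (size + 1) 0 i []
      pvOuterAGo xs f p.2 (size + 1) (res ++ [p.1])
    else res

def list_of_lists (arg_list : List Int) : List (List Int) :=
  pvOuterAGo arg_list arg_list.length 0 0 []

-- ===== PORT B =====
-- go(i, k): if i >= len(arg_list): return []; return [arg_list[i:i+k]] + go(i+k, k+1)
-- i grows by k ≥ 1 each call, so fuel = len(arg_list) iterations always suffice.
def pvBGo (xs : List Int) : Nat → Nat → Nat → List (List Int)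
  | 0, _, _ => []
  | f + 1, i, k =>
    if xs.length ≤ i then []
    else PySem.List.slice xs (some (i : Int)) (some ((i : Int) + (k : Int))) :: pvBGo xs f (i + k) (k + 1)

def list_of_lists_alt (arg_list : List Int) : List (List Int) :=
  pvBGo arg_list arg_list.length 0 1

-- ===== PRECONDITION & SPEC =====
def Spec_list_of_lists (arg_list : List Int) (out : List (List Int)) : Prop := out = list_of_lists_alt arg_list
instance (arg_list : List Int) (out : List (List Int)) : Decidable (Spec_list_of_lists arg_list out) := by unfold Spec_list_of_lists; infer_instance

-- ===== CLAIM (what is proved, stated in full; the proofs are below) =====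
def Claim_equal_list_of_lists : Prop := ∀ (arg_list : List Int), Dom_list_of_lists arg_list → Spec_list_of_lists arg_list (list_of_lists arg_list)

-- ===== LEMMAS AND PROOFS =====

-- proof-side chunk spec shared by both directions: successive take/drop chunks of growing size
def pvGoBGo (dummy : Unit) : Nat → List Int → Nat → List (List Int)
  | 0, _, _ => []
  | f + 1, xs, k =>
    match xs with
    | [] => []
    | x :: rest => (x :: rest).take (k + 1) :: pvGoBGo dummy f (rest.drop k) (k + 1)

def pvGoB (xs : List Int) (k : Nat) : List (List Int) :=
  pvGoBGo () xs.length xs k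


theorem pvInnerAGo_eq (xs : List Int) :
    ∀ (k i : Nat) (acc : List Int), i ≤ xs.length →
    pvInnerAGo xs k i acc = (acc ++ (xs.drop i).take k, i + min k (xs.length - i)) := by
  intro k
  induction k with
  | zero => intro i acc hi; simp [pvInnerAGo]
  | succ k ih =>
    intro i acc hi
    by_cases hlen : i = xs.length
    · subst hlen
      rw [pvInnerAGo, if_neg (by simp), List.drop_length]
      simp
    · have hi' : i < xs.length := lt_of_le_of_ne hi hlen
      rw [pvInnerAGo, if_pos hlen, ih (i + 1) _ (by omega)]
      have hdrop : xs.drop i = xs.getD i 0 :: xs.drop (i + 1) := by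
        rw [List.drop_eq_getElem_cons hi']
        simp [List.getD_eq_getElem?_getD, List.getElem?_eq_getElem hi']
      rw [Prod.mk.injEq]
      refine ⟨?_, by omega⟩
      rw [hdrop, List.take_succ_cons]
      simp only [List.append_assoc, List.singleton_append]

theorem pvGoBGo_eq_goB :
    ∀ (f : Nat) (xs : List Int) (k : Nat), xs.length ≤ f →
    pvGoBGo () f xs k = pvGoB xs k := by
  intro f
  induction f using Nat.strong_induction_on with
  | _ f ih =>
    intro xs k hf
    cases f with
    | zero =>
      have hx : xs = [] := List.eq_nil_of_length_eq_zero (by omega)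
      subst hx
      rfl
    | succ f =>
      cases xs with
      | nil => rfl
      | cons x rest =>
        simp only [List.length_cons] at hf
        have e1 : pvGoBGo () (f + 1) (x :: rest) k
            = (x :: rest).take (k + 1) :: pvGoBGo () f (rest.drop k) (k + 1) := rfl
        have e2 : pvGoB (x :: rest) k
            = (x :: rest).take (k + 1) :: pvGoBGo () rest.length (rest.drop k) (k + 1) := rfl
        rw [e1, e2,
          ih f (by omega) _ _ (by simp only [List.length_drop]; omega),
          ih rest.length (by omega) _ _ (by simp [List.length_drop])]

theorem pvGoB_cons (x : Int) (rest : List Int) (k : Nat) :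
    pvGoB (x :: rest) k = (x :: rest).take (k + 1) :: pvGoB (rest.drop k) (k + 1) := by
  show pvGoBGo () (rest.length + 1) (x :: rest) k = _
  show ((x :: rest).take (k + 1) :: pvGoBGo () rest.length (rest.drop k) (k + 1)) = _
  rw [pvGoBGo_eq_goB rest.length (rest.drop k) (k + 1) (by simp [List.length_drop])]

theorem pvOuterAGo_eq_goB (xs : List Int) :
    ∀ (f i size : Nat) (res : List (List Int)), xs.length - i ≤ f → i ≤ xs.length →
    pvOuterAGo xs f i size res = res ++ pvGoB (xs.drop i) size := by
  intro f
  induction f with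
  | zero =>
    intro i size res hf hi
    have hi' : i = xs.length := by omega
    simp [pvOuterAGo, hi', List.drop_length, pvGoB, pvGoBGo]
  | succ f ih =>
    intro i size res hf hi
    by_cases hlt : i < xs.length
    · rw [pvOuterAGo, if_pos hlt]
      show pvOuterAGo xs f (pvInnerA xs (size + 1) 0 i []).2 (size + 1)
          (res ++ [(pvInnerA xs (size + 1) 0 i []).1]) = _
      unfold pvInnerA
      simp only [Nat.sub_zero]
      rw [pvInnerAGo_eq xs (size + 1) i [] (Nat.le_of_lt hlt)]
      simp only [List.nil_append]
      set i' := i + min (size + 1) (xs.length - i) with hi'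
      clear_value i'
      rw [ih i' (size + 1) _ (by omega) (by omega)]
      obtain ⟨x, rest, hdi⟩ : ∃ x rest, xs.drop i = x :: rest := by
        cases h : xs.drop i with
        | nil => exfalso; have := List.drop_eq_nil_iff.mp h; omega
        | cons a b => exact ⟨a, b, rfl⟩
      rw [hdi, pvGoB_cons]
      have hrest : rest = xs.drop (i + 1) := by
        have h1 : (xs.drop i).tail = xs.drop (i + 1) := by
          rw [List.tail_drop]
        simpa [hdi] using h1
      have hdrops : rest.drop size = xs.drop i' := by
        rw [hrest, List.drop_drop]
        by_cases hc : size + 1 ≤ xs.length - i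
        · have heq : i + 1 + size = i' := by omega
          rw [heq]
        · have h1 : xs.drop (i + 1 + size) = [] := List.drop_eq_nil_of_le (by omega)
          have h2 : xs.drop i' = [] := List.drop_eq_nil_of_le (by omega)
          rw [h1, h2]
      rw [hdrops]
      simp
    · have hi' : i = xs.length := by omega
      rw [pvOuterAGo, if_neg hlt]
      simp [hi', List.drop_length, pvGoB, pvGoBGo]

theorem pvBGo_eq_goB (xs : List Int) :
    ∀ (f i k : Nat), xs.length - i ≤ f → 1 ≤ k →
    pvBGo xs f i k = pvGoB (xs.drop i) (k - 1) := by
  intro f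
  induction f with
  | zero =>
    intro i k hf hk
    have hi : xs.length ≤ i := by omega
    rw [List.drop_eq_nil_of_le hi]
    rfl
  | succ f ih =>
    intro i k hf hk
    by_cases hge : xs.length ≤ i
    · rw [List.drop_eq_nil_of_le hge]
      show (if xs.length ≤ i then [] else _) = _
      rw [if_pos hge]
      rfl
    · have hlt : i < xs.length := by omega
      show (if xs.length ≤ i then [] else
        PySem.List.slice xs (some (i : Int)) (some ((i : Int) + (k : Int))) :: pvBGo xs f (i + k) (k + 1)) = _
      rw [if_neg hge, PySem.List.slice_natCast_add, ih (i + k) (k + 1) (by omega) (by omega)]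
      obtain ⟨x, rest, hdi⟩ : ∃ x rest, xs.drop i = x :: rest := by
        cases h : xs.drop i with
        | nil => exfalso; have := List.drop_eq_nil_iff.mp h; omega
        | cons a b => exact ⟨a, b, rfl⟩
      rw [hdi, pvGoB_cons]
      have hk1 : k - 1 + 1 = k := by omega
      rw [hk1]
      have hrest : rest = xs.drop (i + 1) := by
        have h1 : (xs.drop i).tail = xs.drop (i + 1) := by
          rw [List.tail_drop]
        simpa [hdi] using h1
      have hdrops : rest.drop (k - 1) = xs.drop (i + k) := by
        rw [hrest, List.drop_drop]
        have : i + 1 + (k - 1) = i + k := by omega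
        rw [this]
      rw [hdrops]
      have hk2 : k + 1 - 1 = k := by omega
      rw [hk2]

-- ===== VERDICT (by name: the statement is the Claim_ definition above) =====
theorem list_of_lists_spec : Claim_equal_list_of_lists := by
  intro arg_list _
  unfold Spec_list_of_lists list_of_lists list_of_lists_alt
  rw [pvBGo_eq_goB arg_list arg_list.length 0 1 (by omega) (by omega)]
  simpa using pvOuterAGo_eq_goB arg_list arg_list.length 0 0 [] (by omega) (by omega)
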